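-- pv_equiv track=rewrite | github.com/guangxu-li/leetcode-in-python | 301-400/356.line-reflection.py | isReflected
-- ===== SOURCE A (Python) =====
-- from typing import List
--
-- def isReflected(points: List[List[int]]) -> bool:
--     line = min(points)[0] + max(points)[0]
--     origin = set(map(tuple, points))
--     for point in points:
--         reflected = (line - point[0], point[1])
--         if reflected not in origin:
--             return False
--
--     return True
-- ===== SOURCE B (Python) =====
-- from typing import List
--
-- def isReflected(points: List[List[int]]) -> bool:
--     line = min(p[0] for p in points) + max(p[0] for p in points)
--     have = sorted(set(map(tuple, points)))
--     need = sorted({(line - p[0], p[1]) for p in points})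
--     i = 0
--     for d in need:
--         while i < len(have) and have[i] < d:
--             i += 1
--         if i == len(have) or have[i] != d:
--             return False
--         i += 1
--     return True
-- ===== Notes on version B (the rewrite author's own statement) =====
-- stated objective: alternative
-- what changed: Replaces A's hash-set membership test per point with a sort-based algorithm: sort the distinct points and the distinct required reflections (min/max taken over x-coordinates directly instead of lexicographic min/max of whole points) and verify that every required reflection is present with a single two-pointer merge scan over the two sorted lists.
-- outside the precondition, e.g. on isReflected([[0, 1], [3]]): A returns False, B raises IndexError; on isReflected([[2, 2], [2]]): A raises IndexError, B raises IndexError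
import Mathlib
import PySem

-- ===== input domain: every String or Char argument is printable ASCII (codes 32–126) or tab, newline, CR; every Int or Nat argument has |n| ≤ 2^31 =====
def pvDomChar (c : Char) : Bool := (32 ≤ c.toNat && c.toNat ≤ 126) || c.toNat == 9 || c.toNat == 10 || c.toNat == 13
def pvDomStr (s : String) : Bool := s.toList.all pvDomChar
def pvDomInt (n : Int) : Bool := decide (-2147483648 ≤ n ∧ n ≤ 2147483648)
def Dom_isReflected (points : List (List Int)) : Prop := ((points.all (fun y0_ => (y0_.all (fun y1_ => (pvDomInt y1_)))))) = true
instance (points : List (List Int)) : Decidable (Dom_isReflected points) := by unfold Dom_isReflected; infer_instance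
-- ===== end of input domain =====

-- B replaces A's hash-set membership test per point by a sort-based algorithm: sort the
-- distinct points and the distinct required reflections and verify inclusion with one
-- two-pointer merge scan; min/max are taken over x-coordinates directly (alternative
-- algorithm, no speed claim).

-- ===== PORT A =====
def isReflected (points : List (List Int)) : Bool :=
  -- line = min(points)[0] + max(points)[0]  (lexicographic min/max over whole points)
  let line : Int :=
    ((PySem.List.min? points (fun p => p)).bind (fun m => PySem.List.pyGet? m 0)).getD 0 +
    ((PySem.List.max? points (fun p => p)).bind (fun m => PySem.List.pyGet? m 0)).getD 0
  -- origin = set(map(tuple, points))   (tuples modelled as the lists themselves)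
  let origin : PySem.Set (List Int) := PySem.Set.ofList points
  -- for point in points: if (line - point[0], point[1]) not in origin: return False / return True
  points.all (fun point =>
    PySem.Set.contains origin
      [line - (PySem.List.pyGet? point 0).getD 0, (PySem.List.pyGet? point 1).getD 0])

-- ===== PORT B =====
-- B-side helper: the for/while two-pointer loop of Source B — scan the sorted list `hv`
-- once, advancing past elements smaller than the current demand (the index i only moves
-- forward, so the remaining suffix of `hv` is the whole loop state)
def pvMergeSub {α : Type} [LinearOrder α] [DecidableEq α] : List α → List α → Bool
  | [], _ => true                                   -- loop over need finished: return True
  | d :: ds, hv =>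
    match hv.dropWhile (fun h => decide (h < d)) with  -- while i < len(have) and have[i] < d: i += 1
    | [] => false                                   -- i == len(have): return False
    | h :: hs => if h = d then pvMergeSub ds hs else false  -- have[i] != d: return False; else i += 1

def isReflected_alt (points : List (List Int)) : Bool :=
  -- line = min(p[0] for p in points) + max(p[0] for p in points)
  let line : Int :=
    (PySem.List.min? (points.map (fun p => (PySem.List.pyGet? p 0).getD 0)) (fun v => v)).getD 0 +
    (PySem.List.max? (points.map (fun p => (PySem.List.pyGet? p 0).getD 0)) (fun v => v)).getD 0
  -- have = sorted(set(map(tuple, points)))  (Python's tuple order is the lexicographic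
  -- LinearOrder on lists, written explicitly since Lean's default List LT differs in form)
  let hv : List (List Int) :=
    @PySem.List.sorted (List Int) (List Int) List.instLinearOrder.toLT LinearOrder.toDecidableLT
      (PySem.Set.ofList points) (fun x => x) false
  -- need = sorted({(line - p[0], p[1]) for p in points})
  let need : List (List Int) :=
    @PySem.List.sorted (List Int) (List Int) List.instLinearOrder.toLT LinearOrder.toDecidableLT
      (PySem.Set.ofList (points.map (fun p =>
        [line - (PySem.List.pyGet? p 0).getD 0, (PySem.List.pyGet? p 1).getD 0])))
      (fun x => x) false
  pvMergeSub need hv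

-- ===== PRECONDITION & SPEC =====
-- Pre_ excludes empty input and inputs containing a point with fewer than two coordinates:
-- on those A raises ValueError/IndexError except when an earlier failed reflection check
-- short-circuits first — a value-dependent condition with no closed form — and the Python B
-- raises on all of them (its min/max generators and set comprehension touch every point
-- before any check; see the cite for a case where A short-circuits to False and B raises).
def Pre_isReflected (points : List (List Int)) : Prop :=
  points ≠ [] ∧ ∀ p ∈ points, 2 ≤ p.length
instance (points : List (List Int)) : Decidable (Pre_isReflected points) := by
  unfold Pre_isReflected; infer_instance

def pvWitness_isReflected : List (List Int) := [[0, 1], [2, 1]]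

def Spec_isReflected (points : List (List Int)) (out : Bool) : Prop := out = isReflected_alt points
instance (points : List (List Int)) (out : Bool) : Decidable (Spec_isReflected points out) := by
  unfold Spec_isReflected; infer_instance

-- ===== CLAIM (what is proved, stated in full; the proofs are below) =====
def Claim_equal_isReflected : Prop := ∀ (points : List (List Int)), Dom_isReflected points → Pre_isReflected points → Spec_isReflected points (isReflected points)

-- ===== LEMMAS AND PROOFS =====

theorem pvGet0_cons (a : Int) (t : List Int) :
    (PySem.List.pyGet? (a :: t) 0).getD 0 = a := by
  simp [PySem.List.pyGet?, PySem.List.pyIdx?]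

-- lexicographic order on lists compares heads first
theorem pvHead_le {a b : Int} {tm tq : List Int} (h : (a :: tm : List Int) ≤ (b :: tq)) :
    a ≤ b := by
  by_contra hab
  exact absurd (List.Lex.rel (lt_of_not_ge hab)) (not_lt.mpr h)

-- core list order vs the LinearOrder instance on lists: same relation
theorem pvLt_iff (a b : List Int) :
    @LT.lt _ List.instLT a b ↔ @LT.lt _ List.instLinearOrder.toLT a b := by
  show a.lt b ↔ _
  rw [List.lt_iff_lex_lt]
  exact Iff.rfl

-- min?/max? over lists: the default instances and the LinearOrder instances agree
theorem pvMinCast (points : List (List Int)) :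
    PySem.List.min? points (fun p => p)
      = @PySem.List.min? (List Int) (List Int) List.instLinearOrder.toLT
          LinearOrder.toDecidableLT points (fun p => p) := by
  simp only [PySem.List.min?]
  congr 1
  funext acc x
  cases acc with
  | none => rfl
  | some m =>
    dsimp only
    by_cases h : @LT.lt _ List.instLT x m
    · rw [if_pos h, if_pos ((pvLt_iff x m).mp h)]
    · rw [if_neg h, if_neg (fun hc => h ((pvLt_iff x m).mpr hc))]

theorem pvMaxCast (points : List (List Int)) :
    PySem.List.max? points (fun p => p)
      = @PySem.List.max? (List Int) (List Int) List.instLinearOrder.toLT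
          LinearOrder.toDecidableLT points (fun p => p) := by
  simp only [PySem.List.max?]
  congr 1
  funext acc x
  cases acc with
  | none => rfl
  | some m =>
    dsimp only
    by_cases h : @LT.lt _ List.instLT m x
    · rw [if_pos h, if_pos ((pvLt_iff m x).mp h)]
    · rw [if_neg h, if_neg (fun hc => h ((pvLt_iff m x).mpr hc))]

-- min(points)[0] = min of the x-coordinates (all points nonempty, list nonempty)
theorem pvMinHead (points : List (List Int)) (hne : points ≠ [])
    (hlen : ∀ p ∈ points, p ≠ []) :
    ((PySem.List.min? points (fun p => p)).bind (fun m => PySem.List.pyGet? m 0)).getD 0 =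
    (PySem.List.min? (points.map (fun p => (PySem.List.pyGet? p 0).getD 0)) (fun v => v)).getD 0 := by
  obtain ⟨m, hm⟩ : ∃ m, PySem.List.min? points (fun p => p) = some m := by
    cases h : PySem.List.min? points (fun p => p) with
    | none => exact absurd ((PySem.List.min?_eq_none_iff _ _).mp h) hne
    | some m => exact ⟨m, rfl⟩
  obtain ⟨a, tm, hab⟩ := List.exists_cons_of_ne_nil (hlen m (PySem.List.min?_mem hm))
  obtain ⟨v, hv⟩ : ∃ v, PySem.List.min? (points.map (fun p => (PySem.List.pyGet? p 0).getD 0)) (fun v => v) = some v := by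
    cases h : PySem.List.min? (points.map (fun p => (PySem.List.pyGet? p 0).getD 0)) (fun v => v) with
    | none => exact absurd (List.map_eq_nil_iff.mp ((PySem.List.min?_eq_none_iff _ _).mp h)) hne
    | some v => exact ⟨v, rfl⟩
  have hva : v ≤ a := by
    have : ((PySem.List.pyGet? m 0).getD 0) ∈ points.map (fun p => (PySem.List.pyGet? p 0).getD 0) :=
      List.mem_map_of_mem (PySem.List.min?_mem hm)
    have := PySem.List.min?_isMin hv _ this
    simpa [hab, pvGet0_cons] using this
  have hav : a ≤ v := by
    obtain ⟨q, hq, hqv⟩ := List.mem_map.mp (PySem.List.min?_mem hv)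
    obtain ⟨c, tq, hcd⟩ := List.exists_cons_of_ne_nil (hlen q hq)
    have hm2 : @PySem.List.min? (List Int) (List Int) List.instLinearOrder.toLT
        LinearOrder.toDecidableLT points (fun p => p) = some m := (pvMinCast points) ▸ hm
    have hle : m ≤ q := PySem.List.min?_isMin (key := fun p => p) hm2 q hq
    rw [hab, hcd] at hle
    have : a ≤ c := pvHead_le hle
    rw [← hqv, hcd, pvGet0_cons]; exact this
  rw [hm, hv, hab]
  simp only [Option.bind_some, pvGet0_cons]
  exact (le_antisymm hva hav).symm ▸ rfl

-- max(points)[0] = max of the x-coordinates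
theorem pvMaxHead (points : List (List Int)) (hne : points ≠ [])
    (hlen : ∀ p ∈ points, p ≠ []) :
    ((PySem.List.max? points (fun p => p)).bind (fun m => PySem.List.pyGet? m 0)).getD 0 =
    (PySem.List.max? (points.map (fun p => (PySem.List.pyGet? p 0).getD 0)) (fun v => v)).getD 0 := by
  obtain ⟨m, hm⟩ : ∃ m, PySem.List.max? points (fun p => p) = some m := by
    cases h : PySem.List.max? points (fun p => p) with
    | none => exact absurd ((PySem.List.max?_eq_none_iff _ _).mp h) hne
    | some m => exact ⟨m, rfl⟩
  obtain ⟨a, tm, hab⟩ := List.exists_cons_of_ne_nil (hlen m (PySem.List.max?_mem hm))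
  obtain ⟨v, hv⟩ : ∃ v, PySem.List.max? (points.map (fun p => (PySem.List.pyGet? p 0).getD 0)) (fun v => v) = some v := by
    cases h : PySem.List.max? (points.map (fun p => (PySem.List.pyGet? p 0).getD 0)) (fun v => v) with
    | none => exact absurd (List.map_eq_nil_iff.mp ((PySem.List.max?_eq_none_iff _ _).mp h)) hne
    | some v => exact ⟨v, rfl⟩
  have hva : a ≤ v := by
    have : ((PySem.List.pyGet? m 0).getD 0) ∈ points.map (fun p => (PySem.List.pyGet? p 0).getD 0) :=
      List.mem_map_of_mem (PySem.List.max?_mem hm)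
    have := PySem.List.max?_isMax hv _ this
    simpa [hab, pvGet0_cons] using this
  have hav : v ≤ a := by
    obtain ⟨q, hq, hqv⟩ := List.mem_map.mp (PySem.List.max?_mem hv)
    obtain ⟨c, tq, hcd⟩ := List.exists_cons_of_ne_nil (hlen q hq)
    have hm2 : @PySem.List.max? (List Int) (List Int) List.instLinearOrder.toLT
        LinearOrder.toDecidableLT points (fun p => p) = some m := (pvMaxCast points) ▸ hm
    have hle : q ≤ m := PySem.List.max?_isMax (key := fun p => p) hm2 q hq
    rw [hab, hcd] at hle
    have : c ≤ a := pvHead_le hle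
    rw [← hqv, hcd, pvGet0_cons]; exact this
  rw [hm, hv, hab]
  simp only [Option.bind_some, pvGet0_cons]
  exact (le_antisymm hva hav) ▸ rfl

-- mem_sorted at the explicit lexicographic instances used in the B port
theorem pvMemSorted (xs : List (List Int)) (x : List Int) :
    x ∈ @PySem.List.sorted (List Int) (List Int) List.instLinearOrder.toLT
        LinearOrder.toDecidableLT xs (fun y => y) false ↔ x ∈ xs :=
  @PySem.List.mem_sorted _ _ List.instLinearOrder.toLT LinearOrder.toDecidableLT xs _ false x

-- the merge scan over two strictly increasing lists decides inclusion
theorem pvMergeSub_iff {α : Type} [LinearOrder α] [DecidableEq α]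
    (need hv : List α) (hneed : need.Pairwise (· < ·)) (hhv : hv.Pairwise (· < ·)) :
    pvMergeSub need hv = true ↔ ∀ d ∈ need, d ∈ hv := by
  induction need generalizing hv with
  | nil => simp [pvMergeSub]
  | cons d ds ih =>
    have hsplit : hv.takeWhile (fun h => decide (h < d)) ++ hv.dropWhile (fun h => decide (h < d)) = hv :=
      List.takeWhile_append_dropWhile
    have hdsort : (hv.dropWhile (fun h => decide (h < d))).Pairwise (· < ·) :=
      hhv.sublist (List.dropWhile_sublist _)
    cases hdrop : hv.dropWhile (fun h => decide (h < d)) with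
    | nil =>
      have hred : pvMergeSub (d :: ds) hv = false := by rw [pvMergeSub, hdrop]
      rw [hred]
      refine iff_of_false (by simp) fun hall => ?_
      have hdhv := hall d List.mem_cons_self
      rw [← hsplit, hdrop, List.append_nil] at hdhv
      exact absurd (of_decide_eq_true
        (List.mem_takeWhile_imp (p := fun h => decide (h < d)) hdhv)) (lt_irrefl d)
    | cons h hs =>
      have hdh : d ≤ h := by
        have := List.head_dropWhile_not (fun x => decide (x < d)) (l := hv) (by simp [hdrop])
        simp only [hdrop, List.head_cons, decide_eq_false_iff_not] at this
        exact not_lt.mp this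
      rw [hdrop] at hdsort
      have hred : pvMergeSub (d :: ds) hv = (if h = d then pvMergeSub ds hs else false) := by
        rw [pvMergeSub, hdrop]
      rw [hred]
      by_cases hde : h = d
      · subst hde
        rw [if_pos rfl, ih hs hneed.of_cons hdsort.of_cons]
        constructor
        · intro hall e he
          rcases List.mem_cons.mp he with rfl | he
          · exact (List.Sublist.mem · (List.dropWhile_sublist _)) (hdrop ▸ List.mem_cons_self)
          · exact (List.Sublist.mem · (List.dropWhile_sublist _))
              (hdrop ▸ List.mem_cons_of_mem _ (hall e he))
        · intro hall e he
          have hhe : h < e := List.rel_of_pairwise_cons hneed he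
          have : e ∈ hv := hall e (List.mem_cons_of_mem _ he)
          rw [← hsplit, hdrop] at this
          rcases List.mem_append.mp this with htw | hin
          · exact absurd (lt_trans (of_decide_eq_true
                (List.mem_takeWhile_imp (p := fun x => decide (x < h)) htw)) hhe) (lt_irrefl e)
          · rcases List.mem_cons.mp hin with rfl | hin
            · exact absurd hhe (lt_irrefl e)
            · exact hin
      · rw [if_neg hde]
        refine iff_of_false (by simp) fun hall => ?_
        have : d ∈ hv := hall d List.mem_cons_self
        rw [← hsplit, hdrop] at this
        rcases List.mem_append.mp this with htw | hin
        · exact absurd (of_decide_eq_true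
            (List.mem_takeWhile_imp (p := fun h => decide (h < d)) htw)) (lt_irrefl d)
        · rcases List.mem_cons.mp hin with rfl | hin
          · exact hde rfl
          · exact absurd (List.rel_of_pairwise_cons hdsort hin) (not_lt.mpr hdh)

-- ===== VERDICT (by name: the statement is the Claim_ definition above) =====
theorem isReflected_spec : Claim_equal_isReflected := by
  intro points _ hpre
  obtain ⟨hne, hlen⟩ := hpre
  have hlen' : ∀ p ∈ points, p ≠ [] := by
    intro p hp h
    have := hlen p hp
    simp [h] at this
  unfold Spec_isReflected isReflected isReflected_alt
  simp only []
  rw [pvMinHead points hne hlen', pvMaxHead points hne hlen']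
  rw [Bool.eq_iff_iff, List.all_eq_true,
    pvMergeSub_iff _ _ (PySem.List.sorted_ofList_pairwise_lt _)
      (PySem.List.sorted_ofList_pairwise_lt _)]
  constructor
  · intro h1 d hd
    rw [pvMemSorted, PySem.Set.mem_ofList] at hd
    obtain ⟨p, hp, rfl⟩ := List.mem_map.mp hd
    rw [pvMemSorted, PySem.Set.mem_ofList]
    exact (PySem.Set.mem_ofList _ _).mp ((PySem.Set.contains_iff _ _).mp (h1 p hp))
  · intro h2 p hp
    apply (PySem.Set.contains_iff _ _).mpr
    apply (PySem.Set.mem_ofList _ _).mpr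
    have := h2 _ (by
      rw [pvMemSorted, PySem.Set.mem_ofList]
      exact List.mem_map_of_mem hp)
    rw [pvMemSorted, PySem.Set.mem_ofList] at this
    exact this
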